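-- pv_equiv track=rewrite | github.com/moongchi98/MLP | Programmers_LV.1/Strange_string.py | solution
-- ===== SOURCE A (Python) =====
-- def solution(s):
--     word_list = s.split(" ")
--     new_list =[]
--     for word in word_list:
--         new_words=""
--         for i in range(len(word)):
--             new_words+= word[i].lower() if i % 2 else word[i].upper()
--         new_list.append(new_words)
--     return " ".join(new_list)
-- ===== SOURCE B (Python) =====
-- def solution(s):
--     # single linear scan; index i counts position within the current word and resets on ' '
--     out = []
--     i = 0
--     for c in s:
--         if c == ' ':
--             out.append(c)
--             i = 0
--         else:
--             out.append(c.upper() if i % 2 == 0 else c.lower())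
--             i += 1
--     return ''.join(out)
-- ===== Notes on version B (the rewrite author's own statement) =====
-- stated objective: alternative
-- what changed: Replaced split-into-words + per-word indexed loop + join by a single linear scan over the string that keeps a within-word counter reset at each space, appending characters to one output list.
import Mathlib
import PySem

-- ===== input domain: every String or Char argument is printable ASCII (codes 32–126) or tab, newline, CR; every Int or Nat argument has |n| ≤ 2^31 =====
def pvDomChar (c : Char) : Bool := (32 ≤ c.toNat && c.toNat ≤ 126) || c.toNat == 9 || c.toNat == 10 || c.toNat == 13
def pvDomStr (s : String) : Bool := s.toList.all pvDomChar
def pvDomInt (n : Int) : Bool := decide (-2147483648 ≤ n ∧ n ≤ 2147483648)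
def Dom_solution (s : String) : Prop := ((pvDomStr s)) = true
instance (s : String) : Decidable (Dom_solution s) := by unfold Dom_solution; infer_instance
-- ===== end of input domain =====

-- B changes the decomposition: one linear scan with a per-word counter instead of split/per-word-index/join.

-- ===== PORT A =====
-- new_words loop of A: for i in range(len(word)): new_words += word[i].lower() if i % 2 else word[i].upper()
def solutionWordA (w : List Char) : List Char :=
  (PySem.List.pyRange 0 (PySem.Chars.len w) 1).foldl
    (fun nw i =>
      nw ++ [if PySem.Int.mod i 2 ≠ 0 then PySem.Chars.lowerChar (PySem.List.pyGetD w i 'a')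
             else PySem.Chars.upperChar (PySem.List.pyGetD w i 'a')]) []

def solution (s : String) : String :=
  String.ofList (PySem.Chars.join [' ']
    ((PySem.Chars.splitOn s.toList [' ']).foldl (fun acc w => acc ++ [solutionWordA w]) []))

-- ===== PORT B =====
def solutionStepB (st : List Char × Nat) (c : Char) : List Char × Nat :=
  if c = ' ' then (st.1 ++ [c], 0)
  else (st.1 ++ [if st.2 % 2 = 0 then PySem.Chars.upperChar c else PySem.Chars.lowerChar c], st.2 + 1)

def solution_alt (s : String) : String :=
  String.ofList (s.toList.foldl solutionStepB ([], 0)).1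

-- ===== PRECONDITION & SPEC =====
def Spec_solution (s : String) (out : String) : Prop := out = solution_alt s
instance (s : String) (out : String) : Decidable (Spec_solution s out) := by unfold Spec_solution; infer_instance

-- ===== CLAIM (what is proved, stated in full; the proofs are below) =====
def Claim_equal_solution : Prop := ∀ (s : String), Dom_solution s → Spec_solution s (solution s)

-- ===== LEMMAS AND PROOFS =====

-- toggle of one character at within-word index i
def pvTog (i : Nat) (c : Char) : Char :=
  if i % 2 = 0 then PySem.Chars.upperChar c else PySem.Chars.lowerChar c

-- the intended result of both programs, as a single recursive scan
def pvPayoff : List Char → Nat → List Char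
  | [], _ => []
  | c :: cs, i =>
    if c = ' ' then c :: pvPayoff cs 0 else pvTog i c :: pvPayoff cs (i + 1)

-- per-word toggling starting at index i
def pvGFrom (i : Nat) : List Char → List Char
  | [] => []
  | c :: w => pvTog i c :: pvGFrom (i + 1) w

-- split on a single space, head piece separated from the rest
def pvSplit : List Char → List Char × List (List Char)
  | [] => ([], [])
  | c :: cs =>
    let r := pvSplit cs
    if c = ' ' then ([], r.1 :: r.2) else (c :: r.1, r.2)

-- joined tail pieces, each preceded by the space separator
def pvSepJoin : List (List Char) → List Char
  | [] => []
  | w :: ws => ' ' :: (pvGFrom 0 w ++ pvSepJoin ws)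

theorem pvGo_eq (fuel : Nat) (l cur : List Char) (acc : List (List Char))
    (h : l.length < fuel) :
    PySem.Chars.splitOn.go [' '] fuel l cur acc
      = acc.reverse ++ (cur.reverse ++ (pvSplit l).1) :: (pvSplit l).2 := by
  induction fuel generalizing l cur acc with
  | zero => omega
  | succ fuel ih =>
    cases l with
    | nil => simp [PySem.Chars.splitOn.go, pvSplit]
    | cons c rest =>
      by_cases hc : c = ' '
      · subst hc
        rw [show PySem.Chars.splitOn.go [' '] (fuel+1) (' ' :: rest) cur acc
              = PySem.Chars.splitOn.go [' '] fuel rest [] (cur.reverse :: acc) by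
            simp [PySem.Chars.splitOn.go, List.isPrefixOf]]
        rw [ih rest [] (cur.reverse :: acc) (by simpa using Nat.lt_of_succ_lt_succ h)]
        simp [pvSplit]
      · rw [show PySem.Chars.splitOn.go [' '] (fuel+1) (c :: rest) cur acc
              = PySem.Chars.splitOn.go [' '] fuel rest (c :: cur) acc by
            simp [PySem.Chars.splitOn.go, List.isPrefixOf, Ne.symm hc]]
        rw [ih rest (c :: cur) acc (by simpa using Nat.lt_of_succ_lt_succ h)]
        simp [pvSplit, hc]

theorem pvSplitOn_eq (cs : List Char) :
    PySem.Chars.splitOn cs [' '] = (pvSplit cs).1 :: (pvSplit cs).2 := by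
  unfold PySem.Chars.splitOn
  rw [pvGo_eq (cs.length + 1) cs [] [] (by omega)]
  simp

-- A's per-word loop computes pvGFrom 0
theorem pvWordA_suffix (w : List Char) (k : Nat) (acc : List Char) (hk : k ≤ w.length) :
    (PySem.List.pyRange (k : Int) (PySem.Chars.len w) 1).foldl
      (fun nw i =>
        nw ++ [if PySem.Int.mod i 2 ≠ 0 then PySem.Chars.lowerChar (PySem.List.pyGetD w i 'a')
               else PySem.Chars.upperChar (PySem.List.pyGetD w i 'a')]) acc
      = acc ++ pvGFrom k (w.drop k) := by
  by_cases h : k = w.length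
  · subst h
    have : PySem.List.pyRange (w.length : Int) (PySem.Chars.len w) 1 = [] := by
      simp [PySem.Chars.len, PySem.List.pyRange]
    simp [pvGFrom]
  · have hk' : k < w.length := lt_of_le_of_ne hk h
    have hcons : PySem.List.pyRange (k : Int) (PySem.Chars.len w) 1
        = (k : Int) :: PySem.List.pyRange ((k : Int) + 1) (PySem.Chars.len w) 1 := by
      apply PySem.List.pyRange_one_cons
      simp [PySem.Chars.len]; exact_mod_cast hk'
    rw [hcons]
    simp only [List.foldl_cons]
    have hpush : ((k : Int) + 1) = ((k + 1 : Nat) : Int) := by push_cast; ring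
    rw [hpush, pvWordA_suffix w (k + 1) _ hk']
    have hget : PySem.List.pyGetD w (k : Int) 'a' = w[k] := by
      simp [PySem.List.pyGetD_natCast, List.getD_eq_getElem?_getD, hk']
    have hmod : PySem.Int.mod (k : Int) 2 = ((k % 2 : Nat) : Int) := by
      exact_mod_cast PySem.Int.mod_natCast k 2
    have hdrop : w.drop k = w[k] :: w.drop (k + 1) := List.drop_eq_getElem_cons hk'
    rw [hdrop]
    simp only [pvGFrom, pvTog, hget, hmod]
    by_cases hp : k % 2 = 0
    · simp [hp]
    · have h1 : k % 2 = 1 := by omega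
      simp [h1]
termination_by w.length - k

theorem pvWordA_eq (w : List Char) : solutionWordA w = pvGFrom 0 w := by
  have := pvWordA_suffix w 0 [] (Nat.zero_le _)
  simpa [solutionWordA] using this

-- the join of the toggled pieces is the single-scan payoff
theorem pvJoin_eq (t : List (List Char)) (h : List Char) :
    PySem.Chars.join [' '] (pvGFrom 0 h :: t.map (pvGFrom 0)) = pvGFrom 0 h ++ pvSepJoin t := by
  induction t generalizing h with
  | nil => rw [List.map_nil, PySem.Chars.join_singleton]; simp [pvSepJoin]
  | cons w ws ih =>
    rw [List.map_cons, PySem.Chars.join_cons_cons, ih w]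
    simp [pvSepJoin]

theorem pvSplit_payoff (cs : List Char) (i : Nat) :
    pvGFrom i (pvSplit cs).1 ++ pvSepJoin (pvSplit cs).2 = pvPayoff cs i := by
  induction cs generalizing i with
  | nil => simp [pvSplit, pvPayoff, pvGFrom, pvSepJoin]
  | cons c cs ih =>
    by_cases hc : c = ' '
    · subst hc
      have hs : pvSplit (' ' :: cs) = ([], (pvSplit cs).1 :: (pvSplit cs).2) := by
        simp [pvSplit]
      rw [hs]
      simp [pvGFrom, pvSepJoin, pvPayoff, ih 0]
    · have hs : pvSplit (c :: cs) = (c :: (pvSplit cs).1, (pvSplit cs).2) := by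
        simp [pvSplit, hc]
      rw [hs]
      simp [pvGFrom, pvPayoff, hc, ih (i + 1)]

-- B's fold computes the payoff
theorem pvFoldB (cs : List Char) (acc : List Char) (i : Nat) :
    (cs.foldl solutionStepB (acc, i)).1 = acc ++ pvPayoff cs i := by
  induction cs generalizing acc i with
  | nil => simp [pvPayoff]
  | cons c cs ih =>
    by_cases hc : c = ' '
    · subst hc
      simp only [List.foldl_cons, solutionStepB, pvPayoff]
      rw [ih]; simp
    · simp only [List.foldl_cons, solutionStepB, if_neg hc, pvPayoff, pvTog]
      rw [ih]
      by_cases hp : i % 2 = 0 <;> simp [hp]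

-- ===== VERDICT (by name: the statement is the Claim_ definition above) =====
theorem solution_spec : Claim_equal_solution := by
  intro s _
  show solution s = solution_alt s
  unfold solution solution_alt
  rw [pvFoldB s.toList [] 0, PySem.List.foldl_append_singleton_eq_map, pvSplitOn_eq,
      List.map_cons]
  have hmap : (pvSplit s.toList).2.map solutionWordA = (pvSplit s.toList).2.map (pvGFrom 0) :=
    List.map_congr_left (fun w _ => pvWordA_eq w)
  simp only [List.nil_append]
  rw [pvWordA_eq, hmap, pvJoin_eq, pvSplit_payoff]
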